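-- pv_equiv track=rewrite | github.com/Ryou0634/reversi_python | reversi/board/bit_board/board.py | bit_to_boolean
-- ===== SOURCE A (Python) =====
-- from typing import Dict, List, NewType, Optional
--
-- Bits = NewType("Bits", int)
--
-- def bit_to_boolean(bitboard: Bits, size: int):
--     boolean_board = [[0 for _ in range(size)] for _ in range(size)]
--     mask = 1
--     for row in reversed(range(size)):
--         for col in reversed(range(size)):
--             boolean_board[row][col] = bool(mask & bitboard)
--             mask <<= 1
--     return boolean_board
-- ===== SOURCE B (Python) =====
-- def bit_to_boolean(bitboard, size):
--     # Staged: mask the low size*size bits once, peel them into a flat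
--     # little-endian bit list by repeated divmod, reverse to row-major
--     # order, then reshape by slicing into rows.
--     if size <= 0:
--         return []
--     n = size * size
--     m = bitboard & ((1 << n) - 1)
--     bits = []
--     for _ in range(n):
--         m, r = divmod(m, 2)
--         bits.append(r == 1)
--     bits.reverse()
--     return [bits[i * size:(i + 1) * size] for i in range(size)]
-- ===== Notes on version B (the rewrite author's own statement) =====
-- stated objective: faster
-- what changed: A writes each cell of a preallocated matrix by testing a running left-shifting mask against the integer in a reversed double loop; B instead masks the low size*size bits once, peels the whole bit pattern into one flat list by repeated divmod of the shrinking value, reverses it and reshapes it into rows by slicing.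
import Mathlib
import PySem

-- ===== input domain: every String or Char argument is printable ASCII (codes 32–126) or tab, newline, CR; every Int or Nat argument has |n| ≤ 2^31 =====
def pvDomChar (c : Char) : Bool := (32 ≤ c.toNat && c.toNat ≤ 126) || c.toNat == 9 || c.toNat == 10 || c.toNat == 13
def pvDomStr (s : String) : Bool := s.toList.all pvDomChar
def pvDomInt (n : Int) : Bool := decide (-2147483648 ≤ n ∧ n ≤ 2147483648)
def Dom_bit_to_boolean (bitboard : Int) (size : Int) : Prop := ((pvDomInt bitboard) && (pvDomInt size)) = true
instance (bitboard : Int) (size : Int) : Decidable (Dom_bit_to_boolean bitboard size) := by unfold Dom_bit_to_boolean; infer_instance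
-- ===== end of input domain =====

-- B replaces A's per-cell mask tests into a mutated preallocated matrix by staged passes:
-- mask the low size*size bits once, peel them into a flat bit list by repeated divmod of the
-- shrinking value, reverse, and reshape into rows by slicing (measured faster on large boards).

-- ===== PORT A =====
-- inner-loop body: boolean_board[row][col] = bool(mask & bitboard); mask <<= 1
def pvA_step (bitboard : Int) (row : Nat) (st : List (List Bool) × Int) (col : Nat) :
    List (List Bool) × Int :=
  (st.1.set row ((st.1.getD row []).set col (decide (PySem.Int.band st.2 bitboard ≠ 0))),
   st.2 <<< (1 : Nat))

-- one iteration of 'for row in reversed(range(size))': the whole inner col loop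
def pvA_row (bitboard : Int) (size : Int) (st : List (List Bool) × Int) (row : Nat) :
    List (List Bool) × Int :=
  (List.range size.toNat).reverse.foldl (pvA_step bitboard row) st

def bit_to_boolean (bitboard : Int) (size : Int) : List (List Bool) :=
  -- boolean_board = [[0 …] …] initialises cells that are all overwritten; typed Bool, init false
  ((List.range size.toNat).reverse.foldl (pvA_row bitboard size)
    ((List.range size.toNat).map (fun _ => (List.range size.toNat).map (fun _ => false)),
     (1 : Int))).1

-- ===== PORT B =====
-- loop body: m, r = divmod(m, 2); bits.append(r == 1)
def pvB_step (st : Int × List Bool) (_i : Nat) : Int × List Bool :=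
  (PySem.Int.floordiv st.1 2, st.2 ++ [decide (PySem.Int.mod st.1 2 = 1)])

def bit_to_boolean_alt (bitboard : Int) (size : Int) : List (List Bool) :=
  if size ≤ 0 then [] else
  let n : Nat := (size * size).toNat
  let m0 : Int := PySem.Int.band bitboard (((1 : Int) <<< n) - 1)
  let bits : List Bool := ((List.range n).foldl pvB_step (m0, [])).2.reverse
  (List.range size.toNat).map (fun (i : Nat) =>
    PySem.List.slice bits (some ((i : Int) * size)) (some (((i : Int) + 1) * size)))

-- ===== PRECONDITION & SPEC =====
def Spec_bit_to_boolean (bitboard : Int) (size : Int) (out : List (List Bool)) : Prop := out = bit_to_boolean_alt bitboard size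
instance (bitboard : Int) (size : Int) (out : List (List Bool)) : Decidable (Spec_bit_to_boolean bitboard size out) := by unfold Spec_bit_to_boolean; infer_instance

-- ===== CLAIM (what is proved, stated in full; the proofs are below) =====
def Claim_equal_bit_to_boolean : Prop := ∀ (bitboard : Int) (size : Int), Dom_bit_to_boolean bitboard size → Spec_bit_to_boolean bitboard size (bit_to_boolean bitboard size)

-- ===== LEMMAS AND PROOFS =====

lemma pv_set_getD_self' (l : List (List Bool)) (i : Nat) (h : i < l.length) :
    l.set i (l.getD i []) = l := by
  apply List.ext_getElem <;> simp
  intro n h1 h2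
  rw [List.getElem_set]
  split
  · subst ‹_›; simp [List.getElem?_eq_getElem h]
  · rfl

lemma pv_drop_set (l : List Bool) (i : Nat) (a : Bool) (h : i < l.length) :
    (l.set i a).drop i = a :: l.drop (i + 1) := by
  apply List.ext_getElem
  · simp; omega
  · intro n h1 h2
    rw [List.getElem_drop]
    rcases n with _ | n
    · simp [List.getElem_set_self]
    · simp only [List.getElem_cons_succ, List.getElem_drop]
      rw [List.getElem_set_ne (by omega)]
      congr 1; omega

lemma pv_drop_set' (l : List (List Bool)) (i : Nat) (a : List Bool) (h : i < l.length) :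
    (l.set i a).drop i = a :: l.drop (i + 1) := by
  apply List.ext_getElem
  · simp; omega
  · intro n h1 h2
    rw [List.getElem_drop]
    rcases n with _ | n
    · simp [List.getElem_set_self]
    · simp only [List.getElem_cons_succ, List.getElem_drop]
      rw [List.getElem_set_ne (by omega)]
      congr 1; omega

lemma pv_getD_set_self' (l : List (List Bool)) (i : Nat) (a : List Bool) (h : i < l.length) :
    (l.set i a).getD i [] = a := by
  simp [List.getD, h]

lemma pv_getD_set_ne' (l : List (List Bool)) (i j : Nat) (a : List Bool) (h : i ≠ j) :
    (l.set i a).getD j [] = l.getD j [] := by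
  simp [List.getD, List.getElem?_set_ne h]

lemma pv_shift_shift (j : Nat) : ((1 : Int) <<< j) <<< (1 : Nat) = (1 : Int) <<< (j + 1) := by
  simp [Int.shiftLeft_eq, pow_succ]

-- the inner column loop of A, fully characterised
lemma pv_inner (bitboard : Int) (row : Nat) :
    ∀ (k j : Nat) (board : List (List Bool)), row < board.length →
      k ≤ (board.getD row []).length →
      (List.range k).reverse.foldl (pvA_step bitboard row) (board, (1 : Int) <<< j)
        = (board.set row
            (((List.range k).map (fun c =>
                decide (PySem.Int.band ((1 : Int) <<< (j + (k - 1 - c))) bitboard ≠ 0)))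
              ++ (board.getD row []).drop k),
           (1 : Int) <<< (j + k)) := by
  intro k
  induction k with
  | zero =>
    intro j board hrow _hk
    simp only [List.range_zero, List.reverse_nil, List.foldl_nil, List.map_nil,
      List.nil_append, List.drop_zero, Nat.add_zero]
    rw [pv_set_getD_self' board row hrow]
  | succ k ih =>
    intro j board hrow hk
    have hrlen : k < (board.getD row []).length := by omega
    rw [List.range_succ, List.reverse_append]
    simp only [List.reverse_singleton, List.singleton_append, List.foldl_cons]
    have hstep : pvA_step bitboard row (board, (1 : Int) <<< j) k
        = (board.set row ((board.getD row []).set k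
            (decide (PySem.Int.band ((1 : Int) <<< j) bitboard ≠ 0))), (1 : Int) <<< (j + 1)) := by
      simp [pvA_step, pv_shift_shift]
    rw [hstep]
    rw [ih (j + 1) _ (by simpa using hrow)
        (by rw [pv_getD_set_self' _ _ _ hrow]; simp only [List.length_set]; omega)]
    rw [pv_getD_set_self' _ _ _ hrow]
    rw [List.set_set]
    rw [Prod.mk.injEq]
    constructor
    · congr 1
      rw [pv_drop_set _ _ _ hrlen]
      rw [List.map_append]
      simp only [List.map_cons, List.map_nil, List.append_assoc, List.singleton_append]
      congr 1
      · apply List.map_congr_left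
        intro c hc
        rw [List.mem_range] at hc
        rw [show j + (k + 1 - 1 - c) = j + 1 + (k - 1 - c) from by omega]
      · rw [show j + (k + 1 - 1 - k) = j from by omega]
    · congr 1
      omega

-- the outer row loop of A, fully characterised
lemma pv_outer (bitboard : Int) (size : Int) :
    ∀ (k j : Nat) (board : List (List Bool)), k ≤ board.length →
      (∀ r, r < k → (board.getD r []).length = size.toNat) →
      (List.range k).reverse.foldl (pvA_row bitboard size) (board, (1 : Int) <<< j)
        = (((List.range k).map (fun r =>
              (List.range size.toNat).map (fun c =>
                decide (PySem.Int.band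
                  ((1 : Int) <<< (j + (k - 1 - r) * size.toNat + (size.toNat - 1 - c)))
                  bitboard ≠ 0))))
            ++ board.drop k,
           (1 : Int) <<< (j + k * size.toNat)) := by
  intro k
  induction k with
  | zero =>
    intro j board _ _
    simp
  | succ k ih =>
    intro j board hk hlen
    have hkb : k < board.length := by omega
    rw [List.range_succ, List.reverse_append]
    simp only [List.reverse_singleton, List.singleton_append, List.foldl_cons]
    have hrowk : pvA_row bitboard size (board, (1 : Int) <<< j) k
        = (board.set k ((List.range size.toNat).map (fun c =>
              decide (PySem.Int.band ((1 : Int) <<< (j + (size.toNat - 1 - c))) bitboard ≠ 0))),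
           (1 : Int) <<< (j + size.toNat)) := by
      unfold pvA_row
      rw [pv_inner bitboard k size.toNat j board hkb (by rw [hlen k (by omega)])]
      rw [List.drop_eq_nil_of_le (by rw [hlen k (by omega)]), List.append_nil]
    rw [hrowk]
    rw [ih (j + size.toNat) _ (by simp only [List.length_set]; omega)
        (by intro r hr
            rw [pv_getD_set_ne' _ _ _ _ (by omega)]
            exact hlen r (by omega))]
    rw [Prod.mk.injEq]
    constructor
    · rw [pv_drop_set' _ _ _ hkb]
      rw [List.map_append]
      simp only [List.map_cons, List.map_nil, List.append_assoc, List.singleton_append]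
      congr 1
      · apply List.map_congr_left
        intro r hr
        rw [List.mem_range] at hr
        apply List.map_congr_left
        intro c _
        rw [show j + (k + 1 - 1 - r) * size.toNat = j + size.toNat + (k - 1 - r) * size.toNat from by
              rw [show k + 1 - 1 - r = (k - 1 - r) + 1 from by omega, add_mul, one_mul]; omega]
      · rw [show j + (k + 1 - 1 - k) * size.toNat = j from by
              rw [show k + 1 - 1 - k = 0 from by omega]; simp]
    · congr 1
      rw [add_mul, one_mul]
      omega

lemma pv_one_eq_shift : (1 : Int) = (1 : Int) <<< (0 : Nat) := by decide

-- B's divmod loop, fully characterised (the running value stays a Nat cast)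
lemma pv_fold (m : Nat) (acc : List Bool) :
    ∀ (n : Nat),
      (List.range n).foldl pvB_step ((m : Int), acc)
        = (((m / 2 ^ n : Nat) : Int),
           acc ++ (List.range n).map (fun k => decide (m / 2 ^ k % 2 = 1))) := by
  intro n
  induction n with
  | zero => simp
  | succ n ih =>
    rw [List.range_succ, List.foldl_append, ih]
    simp only [List.foldl_cons, List.foldl_nil, pvB_step]
    rw [Prod.mk.injEq]
    constructor
    · rw [show (2 : Int) = ((2 : Nat) : Int) from by norm_num, PySem.Int.floordiv_natCast]
      norm_num [Nat.div_div_eq_div_mul, pow_succ]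
    · rw [show (2 : Int) = ((2 : Nat) : Int) from by norm_num, PySem.Int.mod_natCast]
      simp only [List.map_append, List.map_cons, List.map_nil, Nat.cast_eq_one]
      rw [List.append_assoc]

lemma pv_reverse_map_range {α : Type} (n : Nat) (f : Nat → α) :
    ((List.range n).map f).reverse = (List.range n).map (fun k => f (n - 1 - k)) := by
  apply List.ext_getElem
  · simp
  · intro i h1 h2
    simp only [List.getElem_reverse, List.getElem_map, List.getElem_range,
      List.length_map, List.length_range] at *

lemma pv_two_pow_shift (n : Nat) : ((1 : Int) <<< n) = ((2 ^ n : Nat) : Int) := by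
  simp [Int.shiftLeft_eq]

-- the masked value is the nonnegative low-n-bits value, in Nat form
lemma pv_mask_nonneg (b : Int) (n : Nat) :
    0 ≤ PySem.Int.band b (((1 : Int) <<< n) - 1) := by
  rw [PySem.Int.band_comm]
  exact PySem.Int.band_nonneg_of_nonneg_left _ (by rw [pv_two_pow_shift]; have := Nat.one_le_two_pow (n := n); omega)

-- complement arithmetic: dividing the n-bit complement flips each bit
lemma pv_compl_div_mod (n j x : Nat) (hj : j < n) (hx : x < 2 ^ n) :
    (2 ^ n - 1 - x) / 2 ^ j % 2 = 1 - x / 2 ^ j % 2 := by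
  set A := 2 ^ (n - j) with hA
  set B := 2 ^ j with hB
  have hAB : 2 ^ n = A * B := by rw [hA, hB, ← pow_add]; congr 1; omega
  have hBpos : 0 < B := Nat.two_pow_pos _
  set q := x / B with hq
  set r := x % B with hr
  have hxqr : x = q * B + r := by
    rw [hq, hr, Nat.mul_comm]
    exact (Nat.div_add_mod x B).symm
  have hrB : r < B := Nat.mod_lt _ hBpos
  have hqA : q < A := by
    rw [hq]
    apply Nat.div_lt_of_lt_mul
    rw [Nat.mul_comm, ← hAB]; exact hx
  have hAeven : 2 ∣ A := by
    rw [hA]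
    exact dvd_pow_self 2 (by omega)
  have hsub : (A - 1 - q) * B = A * B - B - q * B := by
    rw [Nat.sub_mul, Nat.sub_mul, one_mul]
  have hqB : q * B + B ≤ A * B := by
    have h := Nat.mul_le_mul_right B (show q + 1 ≤ A from by omega)
    rw [add_mul, one_mul] at h
    exact h
  have hval : 2 ^ n - 1 - x = (A - 1 - q) * B + (B - 1 - r) := by
    rw [hsub, hAB]
    omega
  have hdiv : (2 ^ n - 1 - x) / B = A - 1 - q := by
    rw [hval, show (A - 1 - q) * B = B * (A - 1 - q) from Nat.mul_comm _ _,
       Nat.mul_add_div hBpos, Nat.div_eq_of_lt (by omega), Nat.add_zero]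
  rw [hdiv, hq]
  omega

-- bit j of the truncated complement (third case of PySem.Int.band on a negative left input)
lemma pv_testBit_mod (c n j : Nat) (hj : j < n) :
    (c % 2 ^ n).testBit j = c.testBit j := by
  rw [Nat.testBit_mod_two_pow]
  simp [hj]

-- the cell bridge: B's bit k of the masked value equals A's mask test, for k < n
lemma pv_cell (b : Int) (n j : Nat) (hj : j < n) :
    decide ((PySem.Int.band b (((1 : Int) <<< n) - 1)).toNat / 2 ^ j % 2 = 1)
      = decide (PySem.Int.band ((1 : Int) <<< j) b ≠ 0) := by
  have hM : (((1 : Int) <<< n) - 1) = ((2 ^ n - 1 : Nat) : Int) := by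
    rw [pv_two_pow_shift]
    have := Nat.one_le_two_pow (n := n)
    omega
  by_cases hb : 0 ≤ b
  · -- b ≥ 0
    rw [hM]
    have h1 : PySem.Int.band b ((2 ^ n - 1 : Nat) : Int) = ((b.toNat &&& (2 ^ n - 1) : Nat) : Int) := by
      conv_lhs => rw [show b = ((b.toNat : Nat) : Int) from by omega]
      rw [PySem.Int.band_natCast]
    have h2 : PySem.Int.band ((1 : Int) <<< j) b = (((2 ^ j : Nat) &&& b.toNat : Nat) : Int) := by
      conv_lhs => rw [show b = ((b.toNat : Nat) : Int) from by omega, pv_two_pow_shift j]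
      rw [PySem.Int.band_natCast]
    rw [h1, h2, Int.toNat_natCast]
    rw [Nat.and_two_pow_sub_one_eq_mod]
    rw [← Nat.testBit_eq_decide_div_mod_eq, pv_testBit_mod _ _ _ hj]
    rw [Nat.two_pow_and]
    rcases h : b.toNat.testBit j <;> simp [h, Nat.two_pow_pos]
  · -- b < 0: two's complement branches of PySem.Int.band
    set c := (-b - 1).toNat with hc
    have hA : PySem.Int.band ((1 : Int) <<< j) b
        = (((2 ^ j : Nat) - ((2 ^ j : Nat) &&& c) : Nat) : Int) := by
      unfold PySem.Int.band
      rw [if_pos (show (0 : Int) ≤ (1 : Int) <<< j from by rw [pv_two_pow_shift]; positivity),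
          if_neg (by omega)]
      rw [pv_two_pow_shift, Int.toNat_natCast, ← hc]
    have hB : PySem.Int.band b (((1 : Int) <<< n) - 1)
        = (((2 ^ n - 1) - ((2 ^ n - 1) &&& c) : Nat) : Int) := by
      unfold PySem.Int.band
      rw [if_neg (by omega),
          if_pos (show (0 : Int) ≤ ((1 : Int) <<< n) - 1 from by
            rw [pv_two_pow_shift]
            have := Nat.one_le_two_pow (n := n)
            omega)]
      rw [hM, Int.toNat_natCast, ← hc]
    rw [hA, hB, Int.toNat_natCast]
    rw [show (2 ^ n - 1) &&& c = c &&& (2 ^ n - 1) from Nat.land_comm _ _,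
        Nat.and_two_pow_sub_one_eq_mod, Nat.two_pow_and]
    have hcm : c % 2 ^ n < 2 ^ n := Nat.mod_lt _ (Nat.two_pow_pos _)
    rw [pv_compl_div_mod n j (c % 2 ^ n) hj hcm]
    have hbit : (c % 2 ^ n) / 2 ^ j % 2 = (c.testBit j).toNat := by
      rw [← pv_testBit_mod c n j hj, Nat.testBit_eq_decide_div_mod_eq]
      have hx2 : (c % 2 ^ n) / 2 ^ j % 2 < 2 := Nat.mod_lt _ (by norm_num)
      by_cases h : (c % 2 ^ n) / 2 ^ j % 2 = 1 <;> simp [h] <;> omega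
    rw [hbit]
    rcases h : c.testBit j <;> simp [h, Nat.two_pow_pos]

-- exponent algebra: A's cell exponent is n-1 minus the row-major index
lemma pv_exp (N r c : Nat) (hr : r < N) (hc : c < N) :
    (N - 1 - r) * N + (N - 1 - c) = N * N - 1 - (r * N + c) := by
  obtain ⟨a, ha⟩ : ∃ a, N = r + a + 1 := ⟨N - r - 1, by omega⟩
  have h1 : (N - 1 - r) * N = a * N := by rw [show N - 1 - r = a from by omega]
  have h2 : N * N = r * N + a * N + N := by
    rw [ha]
    ring
  rw [h1, h2]
  omega

theorem bit_to_boolean_spec : Claim_equal_bit_to_boolean := by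
  intro bitboard size _
  unfold Spec_bit_to_boolean
  by_cases hs : size ≤ 0
  · have hN0 : size.toNat = 0 := Int.toNat_of_nonpos hs
    rw [bit_to_boolean_alt, if_pos hs]
    unfold bit_to_boolean
    simp [hN0]
  · rw [bit_to_boolean_alt, if_neg hs]
    unfold bit_to_boolean
    set N := size.toNat with hN
    -- A's side: the characterised nested map
    conv_lhs => rw [pv_one_eq_shift]
    rw [pv_outer bitboard size N 0
        ((List.range N).map (fun _ => (List.range N).map (fun _ => false)))
        (by simp) (by intro r hr; simp [List.getD, hr]; exact hN)]
    simp only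
    rw [List.drop_eq_nil_of_le (by simp), List.append_nil]
    -- B's side: unfold the lets and characterise the fold
    set n : Nat := (size * size).toNat with hn
    set m0 : Int := PySem.Int.band bitboard (((1 : Int) <<< n) - 1) with hm0
    have hm0nn : 0 ≤ m0 := pv_mask_nonneg bitboard n
    have hm0cast : m0 = ((m0.toNat : Nat) : Int) := by omega
    rw [hm0cast, pv_fold m0.toNat [] n]
    simp only [List.nil_append]
    rw [pv_reverse_map_range]
    -- both are maps over range N; compare pointwise
    apply List.ext_getElem
    · simp
    · intro r h1 h2
      simp only [List.length_map, List.length_range] at h1 h2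
      simp only [List.getElem_map, List.getElem_range]
      have hNpos : 0 < N := by omega
      have hsz : size = (N : Int) := by
        rw [hN]; omega
      have hnNN : n = N * N := by
        rw [hn, hsz]
        rw [show ((N : Int) * N) = ((N * N : Nat) : Int) from by push_cast; ring]
        exact Int.toNat_natCast _
      -- the slice is a drop/take of the flat list
      have hcast1 : (r : Int) * size = ((r * N : Nat) : Int) := by rw [hsz]; push_cast; ring
      have hcast2 : ((r : Int) + 1) * size = ((r * N + N : Nat) : Int) := by rw [hsz]; push_cast; ring
      rw [hcast1, hcast2, show ((r * N + N : Nat) : Int) = ((r * N : Nat) : Int) + ((N : Nat) : Int) from by push_cast; ring]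
      rw [PySem.List.slice_natCast_add]
      have hge : r * N + N ≤ N * N := by
        have h := Nat.mul_le_mul_right N (show r + 1 ≤ N from h1)
        rw [add_mul, one_mul] at h
        exact h
      apply List.ext_getElem
      · simp only [List.length_map, List.length_range, List.length_take, List.length_drop,
          List.length_map, List.length_range]
        rw [hnNN]
        omega
      · intro c hc1 hc2
        simp only [List.length_map, List.length_range] at hc1
        simp only [List.getElem_map, List.getElem_range, List.getElem_take, List.getElem_drop,
          List.getElem_map, List.getElem_range]
        rw [pv_cell bitboard n _ (by
          have hpos : 0 < N * N := Nat.mul_pos hNpos hNpos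
          rw [hnNN]; omega)]
        have hexp : 0 + (N - 1 - r) * size.toNat + (size.toNat - 1 - c)
            = n - 1 - (r * N + c) := by
          rw [show size.toNat = N from rfl, Nat.zero_add, hnNN, pv_exp N r c h1 hc1]
        rw [hexp]
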